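-- pv_equiv track=rewrite | github.com/yzzyzz/pdfbook | util.py | genNumberSeqByA4Page
-- ===== SOURCE A (Python) =====
-- def genNumberSeqByA4Page(m):
--     """
--     生成A4纸张的页面排列顺序
--
--     输入：A4纸张数量 m
--     逻辑：m张A4纸张横向叠放后对折，形成一个A5大小的册子
--     每张A4纸包含4个A5页面，总共 4*m 个页面
--     输出：按照册子翻阅顺序 1->4*m 的页面在A4纸上的排列顺序
--
--     示例：
--     1张纸：4-1-2-3
--     2张纸：8-1-2-7, 6-3-4-5
--
--     参数:
--         m (int): A4纸张数量
--
--     返回: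
--         list: 每张A4纸上的4个页面编号列表
--     """
--     if m <= 0:
--         return []
--
--     total_pages = 4 * m  # 总页面数
--     result = []
--
--     # 对于每张A4纸
--     for sheet in range(m):
--         # 计算当前sheet的4个页面编号
--         # 按照书籍折页的规律：
--         # 第1张纸：背面外侧(4), 正面外侧(1), 正面内侧(2), 背面内侧(3)
--         # 第2张纸：背面外侧(8), 正面外侧(5), 正面内侧(6), 背面内侧(7)
--
--         # 背面外侧（从后往前数）
--         back_outside = total_pages - sheet * 2
--         # 正面外侧（从前往后数）
--         front_outside = sheet * 2 + 1
--         # 正面内侧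
--         front_inside = sheet * 2 + 2
--         # 背面内侧（从后往前数）
--         back_inside = total_pages - sheet * 2 - 1
--
--         # A4纸上的页面顺序：背面外侧, 正面外侧, 正面内侧, 背面内侧
--         sheet_pages = [back_outside, front_outside, front_inside, back_inside]
--         result.append(sheet_pages)
--
--     return result
-- ===== SOURCE B (Python) =====
-- def genNumberSeqByA4Page(m):
--     # Staged construction: materialize the page sequence 1..4m, group it into
--     # consecutive (front, back-of-leaf) pairs, then zip the front half of the
--     # pairs against the reversed back half; each sheet takes one pair from each.
--     if m <= 0:
--         return []
--     it = iter(range(1, 4 * m + 1))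
--     pairs = list(zip(it, it))          # [(1,2), (3,4), ..., (4m-1, 4m)]
--     return [[bo, fo, fi, bi]
--             for (fo, fi), (bi, bo) in zip(pairs, reversed(pairs[m:]))]
-- ===== Notes on version B (the rewrite author's own statement) =====
-- stated objective: alternative
-- what changed: replaced the single loop computing each sheet's four pages by closed-form index arithmetic with staged passes: materialize pages 1..4m, group into consecutive pairs, and zip the front half of the pairs with the reversed back half
import Mathlib
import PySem

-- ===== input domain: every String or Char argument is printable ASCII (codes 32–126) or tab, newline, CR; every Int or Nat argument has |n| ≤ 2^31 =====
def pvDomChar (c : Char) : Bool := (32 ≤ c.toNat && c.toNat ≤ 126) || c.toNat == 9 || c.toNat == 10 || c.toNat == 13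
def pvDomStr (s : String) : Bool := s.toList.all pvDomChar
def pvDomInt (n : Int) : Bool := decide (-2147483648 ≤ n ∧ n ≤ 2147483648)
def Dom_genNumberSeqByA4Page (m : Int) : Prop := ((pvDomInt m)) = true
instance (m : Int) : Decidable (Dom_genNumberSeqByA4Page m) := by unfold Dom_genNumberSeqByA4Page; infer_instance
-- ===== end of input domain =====

-- B replaces A's per-sheet index arithmetic with staged passes: materialize pages 1..4m,
-- group into consecutive pairs, zip the front half with the reversed back half (alternative; same cost).

-- ===== PORT A =====
def genNumberSeqByA4Page (m : Int) : List (List Int) :=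
  if m ≤ 0 then []
  else
    let total := 4 * m
    (PySem.List.pyRange 0 m 1).foldl
      (fun result sheet =>
        result ++ [[total - sheet * 2, sheet * 2 + 1, sheet * 2 + 2, total - sheet * 2 - 1]])
      []

-- ===== PORT B =====
-- list(zip(it, it)) over a consumed iterator = group consecutive elements into pairs
def pvPairUp : List Int → List (Int × Int)
  | a :: b :: rest => (a, b) :: pvPairUp rest
  | _ => []

def genNumberSeqByA4Page_alt (m : Int) : List (List Int) :=
  if m ≤ 0 then []
  else
    let pairs := pvPairUp (PySem.List.pyRange 1 (4 * m + 1) 1)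
    (pairs.zip (PySem.List.slice pairs (some m) none).reverse).map
      (fun p => [p.2.2, p.1.1, p.1.2, p.2.1])

-- ===== PRECONDITION & SPEC =====
def Spec_genNumberSeqByA4Page (m : Int) (out : List (List Int)) : Prop := out = genNumberSeqByA4Page_alt m
instance (m : Int) (out : List (List Int)) : Decidable (Spec_genNumberSeqByA4Page m out) := by unfold Spec_genNumberSeqByA4Page; infer_instance

-- ===== CLAIM (what is proved, stated in full; the proofs are below) =====
def Claim_equal_genNumberSeqByA4Page : Prop := ∀ (m : Int), Dom_genNumberSeqByA4Page m → Spec_genNumberSeqByA4Page m (genNumberSeqByA4Page m)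

-- ===== LEMMAS AND PROOFS =====

-- pairing up a 2k-element mapped range gives the mapped range of pairs
theorem pvPairUp_map_range (k : Nat) (f : Nat → Int) :
    pvPairUp ((List.range (2 * k)).map f) =
      (List.range k).map (fun i => (f (2 * i), f (2 * i + 1))) := by
  induction k generalizing f with
  | zero => simp [pvPairUp]
  | succ k ih =>
    have h2 : 2 * (k + 1) = (2 * k + 1) + 1 := by omega
    rw [h2, List.range_succ_eq_map, List.range_succ_eq_map, List.range_succ_eq_map]
    simp only [List.map_cons, List.map_map]
    rw [pvPairUp]
    congr 1
    rw [ih (f ∘ Nat.succ ∘ Nat.succ)]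
    apply List.map_congr_left
    intro i _
    simp only [Function.comp_apply]
    congr 1

-- B in closed form over a natural sheet count
theorem alt_eq_map (n : Nat) :
    genNumberSeqByA4Page_alt (n : Int) =
      (List.range n).map (fun i : Nat =>
        [4 * (n : Int) - 2 * i, 2 * (i : Int) + 1, 2 * (i : Int) + 2, 4 * (n : Int) - 2 * i - 1]) := by
  by_cases hn : (n : Int) ≤ 0
  · have : n = 0 := by omega
    subst this
    rw [genNumberSeqByA4Page_alt]; simp
  rw [genNumberSeqByA4Page_alt, if_neg hn, PySem.List.pyRange_one]
  have h4 : ((4 * (n : Int) + 1 - 1).toNat) = 2 * (2 * n) := by omega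
  rw [h4, pvPairUp_map_range]
  -- split the pair range into front and back halves
  have hsplit : (2 * n) = n + n := by omega
  set g : Nat → Int × Int := fun i => (1 + (2 * i : Nat), 1 + (2 * i + 1 : Nat)) with hg
  have hslice : PySem.List.slice ((List.range (2 * n)).map g) (some (n : Int)) none
      = ((List.range (2 * n)).map g).drop n := PySem.List.slice_from_natCast _ _
  have hdrop : ((List.range (2 * n)).map g).drop n = (List.range n).map (fun i => g (i + n)) := by
    rw [hsplit, List.range_add, List.map_append, List.drop_append_of_le_length (by simp),
        List.drop_of_length_le (by simp), List.nil_append, List.map_map]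
    apply List.map_congr_left
    intro i _
    simp [Nat.add_comm]
  simp only [hslice, hdrop]
  apply List.ext_getElem
  · simp [List.length_zip]; omega
  · intro i h1 h2
    simp only [List.getElem_map, List.getElem_zip, List.getElem_reverse, List.length_map,
      List.length_range, List.getElem_range, hg]
    have hi : i < n := by
      simp [List.length_zip] at h1
      omega
    simp only [List.cons.injEq, and_true]
    push_cast
    refine ⟨by omega, by omega, by omega, by omega⟩

theorem genNumberSeqByA4Page_spec : Claim_equal_genNumberSeqByA4Page := by
  intro m _
  unfold Spec_genNumberSeqByA4Page genNumberSeqByA4Page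
  by_cases hm : m ≤ 0
  · rw [if_pos hm, genNumberSeqByA4Page_alt, if_pos hm]
  · rw [if_neg hm]
    rw [PySem.List.foldl_append_singleton_eq_map, List.nil_append]
    rw [PySem.List.pyRange_one, List.map_map]
    have hmn : m = ((m.toNat : Nat) : Int) := by omega
    rw [hmn, alt_eq_map]
    have : (((m.toNat : Nat) : Int) - 0).toNat = m.toNat := by omega
    rw [this]
    apply List.map_congr_left
    intro i hi
    simp only [Function.comp, List.cons.injEq, and_true]
    omega
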